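-- pv_equiv track=rewrite | github.com/dasi0227/Notes | Static/script/format.py | split_table_cells
-- ===== SOURCE A (Python) =====
-- def split_table_cells(line: str) -> list[str]:
--     stripped = line.strip()
--     if stripped.startswith("|"):
--         stripped = stripped[1:]
--     if stripped.endswith("|"):
--         stripped = stripped[:-1]
--
--     cells: list[str] = []
--     current: list[str] = []
--     escaped = False
--     for char in stripped:
--         if escaped:
--             current.append(char)
--             escaped = False
--             continue
--
--         if char == "\\":
--             current.append(char)
--             escaped = True
--             continue
--
--         if char == "|":
--             cells.append("".join(current).strip())
--             current = []
--             continue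
--
--         current.append(char)
--
--     cells.append("".join(current).strip())
--     return cells
-- ===== SOURCE B (Python) =====
-- # Same result by a different decomposition: one pass records the indices of
-- # unescaped '|' separators, then cells are built by slicing between boundaries.
-- def split_table_cells(line: str) -> list[str]:
--     s = line.strip()
--     if s.startswith("|"):
--         s = s[1:]
--     if s.endswith("|"):
--         s = s[:-1]
--
--     bounds: list[int] = []
--     escaped = False
--     for i, ch in enumerate(s):
--         if escaped:
--             escaped = False
--         elif ch == "\\":
--             escaped = True
--         elif ch == "|":
--             bounds.append(i)
--
--     cells: list[str] = []
--     start = 0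
--     for b in bounds:
--         cells.append(s[start:b].strip())
--         start = b + 1
--     cells.append(s[start:].strip())
--     return cells
-- ===== Notes on version B (the rewrite author's own statement) =====
-- stated objective: alternative
-- what changed: Instead of accumulating each cell character by character in a buffer, B first records the indices of all unescaped pipe separators in one scan and then builds the cells by slicing the trimmed string between consecutive boundaries and stripping each slice.
import Mathlib
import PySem

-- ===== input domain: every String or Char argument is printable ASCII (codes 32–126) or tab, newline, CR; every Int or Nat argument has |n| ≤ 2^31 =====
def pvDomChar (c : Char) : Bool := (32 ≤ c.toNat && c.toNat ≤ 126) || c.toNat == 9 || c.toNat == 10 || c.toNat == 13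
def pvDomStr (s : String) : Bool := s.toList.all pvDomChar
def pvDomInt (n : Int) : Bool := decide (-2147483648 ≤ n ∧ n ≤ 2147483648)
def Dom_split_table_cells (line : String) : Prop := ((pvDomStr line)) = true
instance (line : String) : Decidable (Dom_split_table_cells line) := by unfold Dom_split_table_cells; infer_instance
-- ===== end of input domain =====

-- B re-implements A by a different decomposition (same cost): one scan records the indices of the
-- unescaped pipe separators, then the cells are built by slicing the trimmed string between boundaries.

-- ===== PORT A =====
-- A's loop body: state = (cells, current, escaped); current is the char buffer ("".join = String.ofList).
def stepA (st : List String × List Char × Bool) (c : Char) : List String × List Char × Bool :=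
  if st.2.2 then (st.1, st.2.1 ++ [c], false)
  else if c = '\\' then (st.1, st.2.1 ++ [c], true)
  else if c = '|' then (st.1 ++ [PySem.Str.strip (String.ofList st.2.1)], [], false)
  else (st.1, st.2.1 ++ [c], false)

def split_table_cells (line : String) : List String :=
  let s0 := PySem.Str.strip line
  let s1 := if PySem.Str.startswith s0 "|" then PySem.Str.slice s0 (some 1) none else s0
  let s2 := if PySem.Str.endswith s1 "|" then PySem.Str.slice s1 none (some (-1)) else s1
  let st := s2.toList.foldl stepA ([], [], false)
  st.1 ++ [PySem.Str.strip (String.ofList st.2.1)]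

-- ===== PORT B =====
-- first pass: collect the indices of the unescaped pipe separators (state = (bounds, escaped))
def stepB1 (st : List Int × Bool) (ic : Int × Char) : List Int × Bool :=
  if st.2 then (st.1, false)
  else if ic.2 = '\\' then (st.1, true)
  else if ic.2 = '|' then (st.1 ++ [ic.1], st.2)
  else st

-- second pass: slice the trimmed string between consecutive boundaries (state = (cells, start))
def stepB2 (s : String) (st : List String × Int) (b : Int) : List String × Int :=
  (st.1 ++ [PySem.Str.strip (PySem.Str.slice s (some st.2) (some b))], b + 1)

def split_table_cells_alt (line : String) : List String :=
  let s0 := PySem.Str.strip line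
  let s1 := if PySem.Str.startswith s0 "|" then PySem.Str.slice s0 (some 1) none else s0
  let s2 := if PySem.Str.endswith s1 "|" then PySem.Str.slice s1 none (some (-1)) else s1
  let p := (PySem.List.enumerate s2.toList 0).foldl stepB1 ([], false)
  let q := p.1.foldl (stepB2 s2) ([], 0)
  q.1 ++ [PySem.Str.strip (PySem.Str.slice s2 (some q.2) none)]

-- ===== PRECONDITION & SPEC =====
def Spec_split_table_cells (line : String) (out : List String) : Prop := out = split_table_cells_alt line
instance (line : String) (out : List String) : Decidable (Spec_split_table_cells line out) := by unfold Spec_split_table_cells; infer_instance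

-- ===== CLAIM (what is proved, stated in full; the proofs are below) =====
def Claim_equal_split_table_cells : Prop := ∀ (line : String), Dom_split_table_cells line → Spec_split_table_cells line (split_table_cells line)

-- ===== LEMMAS AND PROOFS =====

-- reference splitter: the raw (unstripped) cells of a char list under '\'-escaping
def rawSplit : List Char → List (List Char)
  | [] => [[]]
  | c :: rest =>
    if c = '\\' then
      match rest with
      | [] => [[c]]
      | d :: rest' =>
        match rawSplit rest' with
        | [] => [[]]
        | h :: t => (c :: d :: h) :: t
    else if c = '|' then [] :: rawSplit rest
    else
      match rawSplit rest with
      | [] => [[]]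
      | h :: t => (c :: h) :: t

def mapHd (f : List Char → List Char) : List (List Char) → List (List Char)
  | [] => []
  | h :: t => f h :: t

def cellStr (l : List Char) : String := String.ofList (PySem.Chars.strip l)

lemma rawSplit_ne_nil (cs : List Char) : rawSplit cs ≠ [] := by
  induction cs using rawSplit.induct <;> (rw [rawSplit.eq_def]; simp_all)

lemma strip_toList (s : String) (l : List Char) (h : s.toList = l) :
    PySem.Str.strip s = String.ofList (PySem.Chars.strip l) := by
  subst h; simp [PySem.Str.strip]

-- A's loop followed by the final append, as one function of the loop state
def finishA (cs : List Char) (cells : List String) (cur : List Char) : List String :=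
  let st := cs.foldl stepA (cells, cur, false)
  st.1 ++ [PySem.Str.strip (String.ofList st.2.1)]

lemma A1 (cs : List Char) : ∀ (cells : List String) (cur : List Char),
    finishA cs cells cur = cells ++ (mapHd (cur ++ ·) (rawSplit cs)).map cellStr := by
  induction cs using rawSplit.induct with
  | case1 =>
    intro cells cur
    rw [show finishA [] cells cur = cells ++ [PySem.Str.strip (String.ofList cur)] from rfl]
    rw [strip_toList _ cur String.toList_ofList]
    simp [rawSplit, mapHd, cellStr]
  | case2 =>
    intro cells cur
    rw [show finishA ['\\'] cells cur
        = cells ++ [PySem.Str.strip (String.ofList (cur ++ ['\\']))] from by simp [finishA, stepA]]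
    rw [strip_toList _ (cur ++ ['\\']) String.toList_ofList]
    rw [rawSplit.eq_def]
    simp [mapHd, cellStr]
  | case3 d rest' hx ih => exact absurd hx (rawSplit_ne_nil rest')
  | case4 d rest' h t hx ih =>
    intro cells cur
    rw [show finishA ('\\' :: d :: rest') cells cur = finishA rest' cells (cur ++ ['\\', d]) from by
      simp [finishA, stepA], ih]
    conv_rhs => rw [rawSplit.eq_def]
    simp [hx, mapHd]
  | case5 rest' hne ih =>
    intro cells cur
    rw [show finishA ('|' :: rest') cells cur
        = finishA rest' (cells ++ [PySem.Str.strip (String.ofList cur)]) [] from by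
      simp [finishA, stepA], ih]
    conv_rhs => rw [rawSplit.eq_def]
    cases hr : rawSplit rest' with
    | nil => exact absurd hr (rawSplit_ne_nil rest')
    | cons h t =>
      simp [hr, mapHd, strip_toList _ cur String.toList_ofList, cellStr]
  | case6 d rest' h1 h2 hx ih => exact absurd hx (rawSplit_ne_nil rest')
  | case7 d rest' h1 h2 h t hx ih =>
    intro cells cur
    rw [show finishA (d :: rest') cells cur = finishA rest' cells (cur ++ [d]) from by
      simp [finishA, stepA, h1, h2], ih]
    conv_rhs => rw [rawSplit.eq_def]
    simp [hx, mapHd, h1, h2]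

-- reference boundary indices of the unescaped pipe separators, counting from offset i
def bnds : List Char → Int → List Int
  | [], _ => []
  | c :: rest, i =>
    if c = '\\' then
      match rest with
      | [] => []
      | _ :: rest' => bnds rest' (i + 2)
    else if c = '|' then i :: bnds rest (i + 1)
    else bnds rest (i + 1)

lemma B1 (cs : List Char) (i : Int) : ∀ (acc : List Int),
    ((PySem.List.enumerate cs i).foldl stepB1 (acc, false)).1 = acc ++ bnds cs i := by
  induction cs, i using bnds.induct with
  | case1 => simp [bnds, PySem.List.enumerate]
  | case2 i =>
    intro acc
    simp [bnds, PySem.List.enumerate, stepB1]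
  | case3 i d rest' ih =>
    intro acc
    rw [bnds.eq_def]
    simp only [PySem.List.enumerate_cons, List.foldl_cons]
    rw [show stepB1 (stepB1 (acc, false) (i, '\\')) (i + 1, d) = (acc, false) from by
      simp [stepB1]]
    rw [show i + 1 + 1 = i + 2 from by ring]
    simpa using ih acc
  | case4 rest i hne ih =>
    intro acc
    rw [bnds.eq_def]
    simp only [PySem.List.enumerate_cons, List.foldl_cons]
    rw [show stepB1 (acc, false) (i, '|') = (acc ++ [i], false) from by simp [stepB1]]
    simp [ih (acc ++ [i])]
  | case5 c rest i h1 h2 ih =>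
    intro acc
    rw [bnds.eq_def]
    simp only [PySem.List.enumerate_cons, List.foldl_cons]
    rw [show stepB1 (acc, false) (i, c) = (acc, false) from by simp [stepB1, h1, h2]]
    simp [h1, h2, ih acc]

-- B's slicing loop followed by the final slice, as one function of the boundary list
def finishB (s : String) (bs : List Int) (start : Int) (acc : List String) : List String :=
  let q := bs.foldl (stepB2 s) (acc, start)
  q.1 ++ [PySem.Str.strip (PySem.Str.slice s (some q.2) none)]

lemma finishB_cons (s : String) (b : Int) (bs : List Int) (start : Int) (acc : List String) :
    finishB s (b :: bs) start acc
      = finishB s bs (b + 1) (acc ++ [PySem.Str.strip (PySem.Str.slice s (some start) (some b))]) := rfl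

lemma bnds_esc_nil (i : Int) : bnds ['\\'] i = [] := by rw [bnds.eq_def]; simp

lemma bnds_pipe (rest : List Char) (i : Int) : bnds ('|' :: rest) i = i :: bnds rest (i + 1) := by
  rw [bnds.eq_def]; simp

lemma bnds_esc (d : Char) (rest' : List Char) (i : Int) :
    bnds ('\\' :: d :: rest') i = bnds rest' (i + 2) := by
  rw [bnds.eq_def]; simp

lemma bnds_other (c : Char) (rest : List Char) (i : Int) (h1 : ¬c = '\\') (h2 : ¬c = '|') :
    bnds (c :: rest) i = bnds rest (i + 1) := by
  rw [bnds.eq_def]; simp [h1, h2]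

lemma sliceFrom (pre rest : List Char) :
    (PySem.Str.slice (String.ofList (pre ++ rest)) (some ((pre.length : Nat) : Int)) none).toList
      = rest := by
  simp [PySem.Str.toList_slice, PySem.List.slice_from_natCast]

lemma sliceMid (pre cur rest : List Char) :
    (PySem.Str.slice (String.ofList (pre ++ (cur ++ rest))) (some ((pre.length : Nat) : Int))
        (some (((pre.length + cur.length : Nat)) : Int))).toList = cur := by
  rw [show (((pre.length + cur.length : Nat)) : Int)
      = ((pre.length : Nat) : Int) + ((cur.length : Nat) : Int) from by push_cast; ring]
  simp only [PySem.Str.toList_slice, String.toList_ofList, PySem.Chars.slice_eq_listSlice,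
    PySem.List.slice_natCast_add]
  rw [List.drop_left, List.take_left]

lemma B2 (cs : List Char) : ∀ (pre cur : List Char) (acc : List String),
    finishB (String.ofList (pre ++ cur ++ cs))
        (bnds cs (((pre.length + cur.length : Nat)) : Int)) ((pre.length : Nat) : Int) acc
      = acc ++ (mapHd (cur ++ ·) (rawSplit cs)).map cellStr := by
  induction cs using rawSplit.induct with
  | case1 =>
    intro pre cur acc
    rw [show bnds [] (((pre.length + cur.length : Nat)) : Int) = [] from rfl]
    rw [show finishB (String.ofList (pre ++ cur ++ [])) [] ((pre.length : Nat) : Int) acc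
        = acc ++ [PySem.Str.strip (PySem.Str.slice (String.ofList (pre ++ cur ++ []))
            (some ((pre.length : Nat) : Int)) none)] from rfl]
    rw [strip_toList _ (cur ++ []) (by simpa using sliceFrom pre (cur ++ []))]
    simp [rawSplit, mapHd, cellStr]
  | case2 =>
    intro pre cur acc
    rw [show ('\\' :: ([] : List Char)) = ['\\'] from rfl, bnds_esc_nil]
    rw [show finishB (String.ofList (pre ++ cur ++ ['\\'])) [] ((pre.length : Nat) : Int) acc
        = acc ++ [PySem.Str.strip (PySem.Str.slice (String.ofList (pre ++ cur ++ ['\\']))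
            (some ((pre.length : Nat) : Int)) none)] from rfl]
    rw [strip_toList _ (cur ++ ['\\']) (by simpa using sliceFrom pre (cur ++ ['\\']))]
    rw [rawSplit.eq_def]
    simp [mapHd, cellStr]
  | case3 d rest' hx ih => exact absurd hx (rawSplit_ne_nil rest')
  | case4 d rest' h t hx ih =>
    intro pre cur acc
    rw [bnds_esc]
    have hlist : pre ++ cur ++ ('\\' :: d :: rest') = pre ++ (cur ++ ['\\', d]) ++ rest' := by simp
    have hidx : (((pre.length + cur.length : Nat)) : Int) + 2
        = (((pre.length + (cur ++ ['\\', d]).length : Nat)) : Int) := by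
      simp [List.length_append]; ring
    rw [hlist, hidx, ih pre (cur ++ ['\\', d]) acc]
    conv_rhs => rw [rawSplit.eq_def]
    simp [hx, mapHd]
  | case5 rest' hne ih =>
    intro pre cur acc
    rw [bnds_pipe, finishB_cons]
    rw [strip_toList _ cur (by simpa using sliceMid pre cur ('|' :: rest'))]
    have hlist : pre ++ cur ++ ('|' :: rest') = (pre ++ cur ++ ['|']) ++ ([] : List Char) ++ rest' := by simp
    have hidx : (((pre.length + cur.length : Nat)) : Int) + 1
        = (((pre ++ cur ++ ['|']).length : Nat) : Int) := by
      simp [List.length_append]; ring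
    have hidx2 : (((pre.length + cur.length : Nat)) : Int) + 1
        = ((((pre ++ cur ++ ['|']).length + ([] : List Char).length : Nat)) : Int) := by
      simpa using hidx
    rw [hlist]
    rw [show bnds rest' ((((pre.length + cur.length : Nat)) : Int) + 1)
        = bnds rest' ((((pre ++ cur ++ ['|']).length + ([] : List Char).length : Nat)) : Int) from by
      rw [← hidx2]]
    rw [show (((pre.length + cur.length : Nat)) : Int) + 1
        = (((pre ++ cur ++ ['|']).length : Nat) : Int) from hidx]
    rw [ih (pre ++ cur ++ ['|']) [] (acc ++ [String.ofList (PySem.Chars.strip cur)])]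
    conv_rhs => rw [rawSplit.eq_def]
    cases hr : rawSplit rest' with
    | nil => exact absurd hr (rawSplit_ne_nil rest')
    | cons hh tt => simp [hr, mapHd, cellStr]
  | case6 d rest' h1 h2 hx ih => exact absurd hx (rawSplit_ne_nil rest')
  | case7 d rest' h1 h2 h t hx ih =>
    intro pre cur acc
    rw [bnds_other d rest' _ h1 h2]
    have hlist : pre ++ cur ++ (d :: rest') = pre ++ (cur ++ [d]) ++ rest' := by simp
    have hidx : (((pre.length + cur.length : Nat)) : Int) + 1
        = (((pre.length + (cur ++ [d]).length : Nat)) : Int) := by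
      simp [List.length_append]; ring
    rw [hlist, hidx, ih pre (cur ++ [d]) acc]
    conv_rhs => rw [rawSplit.eq_def]
    simp [hx, mapHd, h1, h2]

-- both loop pipelines, applied to the same trimmed string, agree
lemma main_eq (s : String) :
    ((s.toList.foldl stepA ([], [], false)).1
        ++ [PySem.Str.strip (String.ofList (s.toList.foldl stepA ([], [], false)).2.1)])
      = ((((PySem.List.enumerate s.toList 0).foldl stepB1 ([], false)).1.foldl (stepB2 s) ([], 0)).1
        ++ [PySem.Str.strip (PySem.Str.slice s
            (some ((((PySem.List.enumerate s.toList 0).foldl stepB1 ([], false)).1.foldl (stepB2 s) ([], 0)).2)) none)]) := by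
  have hA : ((s.toList.foldl stepA ([], [], false)).1
      ++ [PySem.Str.strip (String.ofList (s.toList.foldl stepA ([], [], false)).2.1)])
      = finishA s.toList [] [] := rfl
  have hB1 := B1 s.toList 0 []
  rw [hA, A1, hB1]
  simp only [List.nil_append]
  have hB : ((bnds s.toList 0).foldl (stepB2 s) ([], 0)).1
      ++ [PySem.Str.strip (PySem.Str.slice s
          (some (((bnds s.toList 0).foldl (stepB2 s) ([], 0)).2)) none)]
      = finishB s (bnds s.toList 0) 0 [] := rfl
  rw [hB]
  have := B2 s.toList [] [] []
  simp only [List.nil_append, List.length_nil, Nat.add_zero, Nat.cast_zero] at this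
  rw [show String.ofList s.toList = s from by
    apply String.ext; simpa using String.toList_ofList s.toList] at this
  rw [this]

-- ===== VERDICT (by name: the statement is the Claim_ definition above) =====
theorem split_table_cells_spec : Claim_equal_split_table_cells := by
  intro line _
  unfold Spec_split_table_cells split_table_cells split_table_cells_alt
  exact main_eq _
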